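-- pv_equiv track=rewrite | github.com/none44353/Committee-Assessment | extractor.py | getStrData
-- ===== SOURCE A (Python) =====
-- def getStrData(texts, keyword, volume):
--     data = []
--     for i in range(0, len(texts)):
--         if texts[i].startswith(keyword):
--             items = []
--             for j in range(i + 1, len(texts)):
--                 if not texts[j].isspace():
--                     items.append(texts[j])
--                     if len(items) == volume: break
--             data = data + items
--     return data
-- ===== SOURCE B (Python) =====
-- def getStrData(texts, keyword, volume):
--     # One pass: precompute the indices of non-space lines, keep a pointer
--     # past the current position, and take a volume-sized slice per match.
--     ns = [j for j, t in enumerate(texts) if not t.isspace()]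
--     data = []
--     p = 0
--     for i, t in enumerate(texts):
--         while p < len(ns) and ns[p] <= i:
--             p += 1
--         if t.startswith(keyword):
--             data.extend(texts[j] for j in ns[p:p + volume])
--     return data
-- ===== Notes on version B (the rewrite author's own statement) =====
-- stated objective: alternative
-- what changed: Instead of rescanning the tail of texts after every keyword line and concatenating with 'data = data + items', B precomputes the list of non-space line indices once, advances a pointer past the current position, and extends the result with a volume-sized slice of that index list; Pre_ restricts volume to the natural domain (volume >= 1), excluding volume <= 0 where A's break never fires and it accidentally collects the entire tail.
-- outside the precondition, e.g. on getStrData(['k', 'x'], 'k', 0): A returns ['x'], B returns []; on getStrData(['k', 'x', 'y'], 'k', -1): A returns ['x', 'y'], B returns []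
import Mathlib
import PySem

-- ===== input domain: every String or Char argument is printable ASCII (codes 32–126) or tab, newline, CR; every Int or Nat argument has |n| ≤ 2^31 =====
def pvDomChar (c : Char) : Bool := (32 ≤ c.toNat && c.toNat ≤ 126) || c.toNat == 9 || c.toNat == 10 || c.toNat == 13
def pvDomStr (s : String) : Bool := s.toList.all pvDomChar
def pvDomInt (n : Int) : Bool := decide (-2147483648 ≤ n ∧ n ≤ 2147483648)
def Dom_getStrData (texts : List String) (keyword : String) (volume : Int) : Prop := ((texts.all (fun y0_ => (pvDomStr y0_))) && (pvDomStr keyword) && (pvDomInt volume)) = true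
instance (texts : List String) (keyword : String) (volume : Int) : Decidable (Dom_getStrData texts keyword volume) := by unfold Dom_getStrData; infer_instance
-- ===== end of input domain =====

-- B replaces A's per-keyword-line rescans of the tail (and `data = data + items`) by one
-- precomputed list of non-space line indices, an advancing pointer and a volume-sized slice
-- per match (alternative single-pass structure over an index list).

-- ===== PORT A =====
-- inner loop `for j in range(i+1, len(texts)): ...` with break at volume;
-- j comes from the range so it is in bounds and `getD j ""` is exactly `texts[j]`.
def getStrDataInner (texts : List String) (volume : Int) : List Nat → List String → List String
  | [], items => items
  | j :: js, items =>
    if !(PySem.Str.strIsspace (texts.getD j "")) then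
      let items' := items ++ [texts.getD j ""]
      if (items'.length : Int) = volume then items'
      else getStrDataInner texts volume js items'
    else getStrDataInner texts volume js items

def getStrData (texts : List String) (keyword : String) (volume : Int) : List String :=
  (List.range texts.length).foldl
    (fun data i =>
      if PySem.Str.startswith (texts.getD i "") keyword then
        data ++ getStrDataInner texts volume (List.range' (i + 1) (texts.length - (i + 1))) []
      else data) []

-- ===== PORT B =====
-- Source B's pointer p into ns is represented by the remaining suffix of ns:
-- `while p < len(ns) and ns[p] <= i: p += 1`.
def pvAdvance (i : Nat) : List Nat → List Nat
  | [] => []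
  | q :: qs => if q ≤ i then pvAdvance i qs else q :: qs

-- `for i, t in enumerate(texts)` with t = texts[i]; data.extend(texts[j] for j in ns[p:p+volume]);
-- on this suffix representation the slice ns[p:p+volume] is `take volume.toNat`
-- (exact for volume ≥ 0, hence on all of Pre_).
def getStrDataLoop (texts : List String) (keyword : String) (volume : Int) :
    List Nat → List Nat → List String → List String
  | [], _, data => data
  | i :: is, ns, data =>
    let ns' := pvAdvance i ns
    let data' :=
      if PySem.Str.startswith (texts.getD i "") keyword then
        data ++ (ns'.take volume.toNat).map (fun j => texts.getD j "")
      else data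
    getStrDataLoop texts keyword volume is ns' data'

def getStrData_alt (texts : List String) (keyword : String) (volume : Int) : List String :=
  -- ns = [j for j, t in enumerate(texts) if not t.isspace()]
  let ns := (List.range texts.length).filter (fun j => !(PySem.Str.strIsspace (texts.getD j "")))
  getStrDataLoop texts keyword volume (List.range texts.length) ns []

-- ===== PRECONDITION & SPEC =====
-- Pre_ restricts volume to the natural domain (a positive count of lines to collect):
-- for volume ≤ 0 A's `len(items) == volume` break never fires, so A accidentally
-- collects the entire non-space tail after each match, a value B's slice need not mimic.
def Pre_getStrData (texts : List String) (keyword : String) (volume : Int) : Prop := 1 ≤ volume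
instance (texts : List String) (keyword : String) (volume : Int) : Decidable (Pre_getStrData texts keyword volume) := by unfold Pre_getStrData; infer_instance

def pvWitness_getStrData : List String × String × Int := (["key 1", " ", "a", "b"], "key", 2)

def Spec_getStrData (texts : List String) (keyword : String) (volume : Int) (out : List String) : Prop := out = getStrData_alt texts keyword volume
instance (texts : List String) (keyword : String) (volume : Int) (out : List String) : Decidable (Spec_getStrData texts keyword volume out) := by unfold Spec_getStrData; infer_instance

-- ===== CLAIM (what is proved, stated in full; the proofs are below) =====
def Claim_equal_getStrData : Prop := ∀ (texts : List String) (keyword : String) (volume : Int), Dom_getStrData texts keyword volume → Pre_getStrData texts keyword volume → Spec_getStrData texts keyword volume (getStrData texts keyword volume)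

-- ===== LEMMAS AND PROOFS =====

-- the non-space predicate, the precomputed index list, and the per-match contribution
def pvP (texts : List String) (j : Nat) : Bool := !(PySem.Str.strIsspace (texts.getD j ""))

def pvNs (texts : List String) : List Nat := (List.range texts.length).filter (pvP texts)

def pvG (texts : List String) (keyword : String) (volume : Int) (i : Nat) : List String :=
  if PySem.Str.startswith (texts.getD i "") keyword then
    (((pvNs texts).filter (fun x => decide (i < x))).take volume.toNat).map (fun j => texts.getD j "")
  else []

-- A's inner scan collects the non-space suffix lines, truncated at `volume`
theorem innerA_eq (texts : List String) (volume : Int) :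
    ∀ (js : List Nat) (items : List String),
      (items.length : Int) < volume →
      getStrDataInner texts volume js items =
        items ++ ((js.filter (pvP texts)).map (fun j => texts.getD j "")).take
          (volume - items.length).toNat := by
  intro js
  induction js with
  | nil => intro items _; simp [getStrDataInner]
  | cons j js ih =>
    intro items h
    by_cases hsp : (!(PySem.Str.strIsspace (texts.getD j ""))) = true
    · have hP : pvP texts j = true := hsp
      rw [getStrDataInner]
      simp only [hsp, if_pos]
      by_cases hbr : ((items ++ [texts.getD j ""]).length : Int) = volume
      · simp only [hbr, if_pos]
        have hlen : (volume - (items.length : Int)).toNat = 1 := by simp at hbr ⊢; omega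
        rw [List.filter_cons_of_pos hP, List.map_cons, hlen, List.take_succ_cons, List.take_zero]
      · simp only [hbr, if_neg, not_false_iff]
        have h' : ((items ++ [texts.getD j ""]).length : Int) < volume := by
          simp at hbr ⊢; omega
        rw [ih _ h', List.filter_cons_of_pos hP, List.map_cons]
        have hc : (volume - (items.length : Int)).toNat
            = (volume - ((items ++ [texts.getD j ""]).length : Int)).toNat + 1 := by
          simp at h' ⊢; omega
        rw [hc, List.take_succ_cons]
        simp
    · rw [getStrDataInner]
      simp only [hsp]
      rw [List.filter_cons_of_neg (by simpa [pvP] using hsp)]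
      exact ih _ h

-- advancing past all indices ≤ i on a strictly increasing list is filtering
theorem pvAdvance_eq_filter (i : Nat) :
    ∀ (ns : List Nat), ns.Pairwise (· < ·) →
      pvAdvance i ns = ns.filter (fun x => decide (i < x)) := by
  intro ns
  induction ns with
  | nil => intro _; rfl
  | cons q qs ih =>
    intro hp
    rw [pvAdvance]
    rcases List.pairwise_cons.mp hp with ⟨hq, hqs⟩
    by_cases hle : q ≤ i
    · rw [if_pos hle, List.filter_cons_of_neg (by simp; omega), ih hqs]
    · rw [if_neg hle, List.filter_cons_of_pos (by simp; omega)]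
      have : qs.filter (fun x => decide (i < x)) = qs :=
        List.filter_eq_self.mpr (fun x hx => by simp; have := hq x hx; omega)
      rw [this]

theorem pvNs_pairwise (texts : List String) : (pvNs texts).Pairwise (· < ·) :=
  List.Pairwise.filter _ (List.pairwise_lt_range)

-- the tail of the range, filtered, is the filtered full range past i
theorem filter_range_split (texts : List String) (i : Nat) (hi : i < texts.length) :
    (pvNs texts).filter (fun x => decide (i < x)) =
      (List.range' (i + 1) (texts.length - (i + 1))).filter (pvP texts) := by
  unfold pvNs
  rw [List.filter_comm]
  congr 1
  have hsplit : List.range texts.length =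
      List.range' 0 (i + 1) ++ List.range' (i + 1) (texts.length - (i + 1)) := by
    rw [List.range_eq_range']
    have := List.range'_append_1 (s := 0) (m := i + 1) (n := texts.length - (i + 1))
    simp only [Nat.zero_add] at this
    rw [this]
    congr 1
    omega
  rw [hsplit, List.filter_append]
  have h1 : (List.range' 0 (i + 1)).filter (fun x => decide (i < x)) = [] := by
    apply List.filter_eq_nil_iff.mpr
    intro x hx
    simp only [List.mem_range'] at hx
    simp; omega
  have h2 : (List.range' (i + 1) (texts.length - (i + 1))).filter (fun x => decide (i < x)) =
      List.range' (i + 1) (texts.length - (i + 1)) := by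
    apply List.filter_eq_self.mpr
    intro x hx
    simp only [List.mem_range'] at hx
    simp; omega
  rw [h1, h2]; rfl

-- B's main loop, with the pointer invariant
theorem loopB_eq (texts : List String) (keyword : String) (volume : Int) :
    ∀ (m k : Nat) (ns : List Nat) (data : List String),
      (∀ i, k ≤ i → pvAdvance i ns = (pvNs texts).filter (fun x => decide (i < x))) →
      getStrDataLoop texts keyword volume (List.range' k m) ns data =
        data ++ (List.range' k m).flatMap (pvG texts keyword volume) := by
  intro m
  induction m with
  | zero => intro k ns data _; simp [getStrDataLoop]
  | succ m ih =>
    intro k ns data H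
    rw [List.range'_succ, getStrDataLoop]
    have hns' : pvAdvance k ns = (pvNs texts).filter (fun x => decide (k < x)) :=
      H k le_rfl
    have Hnext : ∀ i, k + 1 ≤ i →
        pvAdvance i (pvAdvance k ns) = (pvNs texts).filter (fun x => decide (i < x)) := by
      intro i hik
      rw [hns', pvAdvance_eq_filter i _ (List.Pairwise.filter _ (pvNs_pairwise texts)),
        List.filter_filter]
      apply List.filter_congr
      intro x _
      simp; omega
    rw [ih (k + 1) _ _ Hnext, List.flatMap_cons]
    unfold pvG
    by_cases hsw : PySem.Str.startswith (texts.getD k "") keyword = true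
    · rw [if_pos hsw, if_pos hsw, hns']
      simp
    · rw [if_neg hsw, if_neg hsw]
      simp

-- A equals the canonical flatMap form (for positive volume)
theorem getStrData_eq_flatMap (texts : List String) (keyword : String) (volume : Int)
    (hv : 1 ≤ volume) :
    getStrData texts keyword volume =
      (List.range texts.length).flatMap (pvG texts keyword volume) := by
  unfold getStrData
  rw [PySem.List.foldl_congr_mem
    (g := fun data i => data ++ pvG texts keyword volume i)]
  · rw [PySem.List.foldl_append_eq_flatMap]; simp
  · intro acc i hi
    have hi' : i < texts.length := List.mem_range.mp hi
    unfold pvG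
    by_cases hsw : PySem.Str.startswith (texts.getD i "") keyword = true
    · simp only [hsw, if_pos]
      congr 1
      rw [innerA_eq texts volume _ [] (by simp; omega)]
      rw [filter_range_split texts i hi']
      simp [List.map_take]
    · rw [if_neg hsw, if_neg hsw]
      simp

theorem getStrData_alt_eq_flatMap (texts : List String) (keyword : String) (volume : Int) :
    getStrData_alt texts keyword volume =
      (List.range texts.length).flatMap (pvG texts keyword volume) := by
  unfold getStrData_alt
  have h0 : ∀ i, 0 ≤ i →
      pvAdvance i ((List.range texts.length).filter (fun j => !(PySem.Str.strIsspace (texts.getD j "")))) =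
        (pvNs texts).filter (fun x => decide (i < x)) := by
    intro i _
    exact pvAdvance_eq_filter i _ (pvNs_pairwise texts)
  have := loopB_eq texts keyword volume texts.length 0
    ((List.range texts.length).filter (fun j => !(PySem.Str.strIsspace (texts.getD j "")))) [] h0
  rw [← List.range_eq_range'] at this
  simpa using this

-- ===== VERDICT (by name: the statement is the Claim_ definition above) =====
theorem getStrData_spec : Claim_equal_getStrData := by
  intro texts keyword volume _ hpre
  unfold Spec_getStrData
  rw [getStrData_eq_flatMap texts keyword volume hpre, getStrData_alt_eq_flatMap]
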